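-- pv_equiv track=rewrite | github.com/Lakshikadhonchak053/HIT137CDU | encrypt.py | encrypt_text_with_meta
-- ===== SOURCE A (Python) =====
-- from typing import Tuple
--
-- ALPHA_LOWER = "abcdefghijklmnopqrstuvwxyz"
--
-- ALPHA_UPPER = "ABCDEFGHIJKLMNOPQRSTUVWXYZ"
--
-- LOWER_FIRST = set("abcdefghijklm")
--
-- LOWER_SECOND = set("nopqrstuvwxyz")
--
-- UPPER_FIRST = set("ABCDEFGHIJKLM")
--
-- UPPER_SECOND = set("NOPQRSTUVWXYZ")
--
-- def _shift_char(c: str, shift: int, alphabet: str) -> str: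
--     if c not in alphabet:
--         return c
--     n = len(alphabet)
--     idx = alphabet.index(c)
--     return alphabet[(idx + shift) % n]
--
-- def encrypt_text_with_meta(text: str, shift1: int, shift2: int) -> Tuple[str, str]:
--     """Return encrypted text and sidecar metadata marking which rule was applied per char.
--
--     Meta codes per character (same length as text):
--     - 'l': original lowercase in a-m (shift forward by shift1*shift2)
--     - 'L': original lowercase in n-z (shift backward by shift1+shift2)
--     - 'u': original uppercase in A-M (shift backward by shift1)
--     - 'U': original uppercase in N-Z (shift forward by shift2**2)
--     - '0': non-alphabetic (unchanged)
--     """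
--     encrypted_chars = []
--     meta_chars = []
--     for c in text:
--         if c.islower():
--             if c in LOWER_FIRST:
--                 encrypted_chars.append(_shift_char(c, shift1 * shift2, ALPHA_LOWER))
--                 meta_chars.append('l')
--             elif c in LOWER_SECOND:
--                 encrypted_chars.append(_shift_char(c, -(shift1 + shift2), ALPHA_LOWER))
--                 meta_chars.append('L')
--             else:
--                 encrypted_chars.append(c)
--                 meta_chars.append('0')
--         elif c.isupper():
--             if c in UPPER_FIRST:
--                 encrypted_chars.append(_shift_char(c, -shift1, ALPHA_UPPER))
--                 meta_chars.append('u')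
--             elif c in UPPER_SECOND:
--                 encrypted_chars.append(_shift_char(c, (shift2 ** 2), ALPHA_UPPER))
--                 meta_chars.append('U')
--             else:
--                 encrypted_chars.append(c)
--                 meta_chars.append('0')
--         else:
--             encrypted_chars.append(c)
--             meta_chars.append('0')
--     return "".join(encrypted_chars), "".join(meta_chars)
-- ===== SOURCE B (Python) =====
-- ALPHA_LOWER = "abcdefghijklmnopqrstuvwxyz"
-- ALPHA_UPPER = "ABCDEFGHIJKLMNOPQRSTUVWXYZ"
--
-- def _build_table(shift1, shift2):
--     table = {}
--     for i, c in enumerate(ALPHA_LOWER):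
--         if i < 13:
--             table[c] = (ALPHA_LOWER[(i + shift1 * shift2) % 26], 'l')
--         else:
--             table[c] = (ALPHA_LOWER[(i - (shift1 + shift2)) % 26], 'L')
--     for i, c in enumerate(ALPHA_UPPER):
--         if i < 13:
--             table[c] = (ALPHA_UPPER[(i - shift1) % 26], 'u')
--         else:
--             table[c] = (ALPHA_UPPER[(i + shift2 ** 2) % 26], 'U')
--     return table
--
-- def encrypt_text_with_meta(text, shift1, shift2):
--     table = _build_table(shift1, shift2)
--     encrypted = []
--     meta = []
--     for c in text:
--         e, m = table.get(c, (c, '0'))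
--         encrypted.append(e)
--         meta.append(m)
--     return "".join(encrypted), "".join(meta)
-- ===== Notes on version B (the rewrite author's own statement) =====
-- stated objective: idiomatic
-- what changed: B precomputes a 52-entry lookup table mapping each ASCII letter to its (encrypted char, meta code) once, then makes a single table.get pass over the text, replacing A's per-character branch chain with set membership tests and a linear alphabet.index scan per character.
import Mathlib
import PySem

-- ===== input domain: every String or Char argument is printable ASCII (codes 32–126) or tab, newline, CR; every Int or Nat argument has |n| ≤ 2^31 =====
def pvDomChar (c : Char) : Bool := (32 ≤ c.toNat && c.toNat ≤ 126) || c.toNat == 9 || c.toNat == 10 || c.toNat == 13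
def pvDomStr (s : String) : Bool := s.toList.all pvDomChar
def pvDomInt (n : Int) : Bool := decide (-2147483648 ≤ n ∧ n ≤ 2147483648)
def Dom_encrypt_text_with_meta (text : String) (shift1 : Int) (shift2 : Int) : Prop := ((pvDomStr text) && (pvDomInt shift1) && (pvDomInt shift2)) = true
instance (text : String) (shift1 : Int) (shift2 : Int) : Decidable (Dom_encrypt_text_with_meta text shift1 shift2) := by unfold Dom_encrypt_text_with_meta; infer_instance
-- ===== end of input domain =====

set_option maxRecDepth 8000
set_option maxHeartbeats 1000000

-- B replaces A's per-character branch-and-index logic by a 52-entry lookup table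
-- built once from the two alphabets; same return value (idiomatic restructuring).

-- ===== PORT A =====
def pvAlphaLower : List Char := ['a', 'b', 'c', 'd', 'e', 'f', 'g', 'h', 'i', 'j', 'k', 'l', 'm', 'n', 'o', 'p', 'q', 'r', 's', 't', 'u', 'v', 'w', 'x', 'y', 'z']
def pvAlphaUpper : List Char := ['A', 'B', 'C', 'D', 'E', 'F', 'G', 'H', 'I', 'J', 'K', 'L', 'M', 'N', 'O', 'P', 'Q', 'R', 'S', 'T', 'U', 'V', 'W', 'X', 'Y', 'Z']
def pvLowerFirst : PySem.Set Char := PySem.Set.ofList ['a', 'b', 'c', 'd', 'e', 'f', 'g', 'h', 'i', 'j', 'k', 'l', 'm']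
def pvLowerSecond : PySem.Set Char := PySem.Set.ofList ['n', 'o', 'p', 'q', 'r', 's', 't', 'u', 'v', 'w', 'x', 'y', 'z']
def pvUpperFirst : PySem.Set Char := PySem.Set.ofList ['A', 'B', 'C', 'D', 'E', 'F', 'G', 'H', 'I', 'J', 'K', 'L', 'M']
def pvUpperSecond : PySem.Set Char := PySem.Set.ofList ['N', 'O', 'P', 'Q', 'R', 'S', 'T', 'U', 'V', 'W', 'X', 'Y', 'Z']

-- _shift_char; the membership guard makes index? succeed and the %-ed index in range,
-- so the .getD defaults are never taken.
def pvShiftChar (c : Char) (shift : Int) (alphabet : List Char) : Char :=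
  if ¬ (c ∈ alphabet) then c
  else
    let n : Int := alphabet.length
    let idx : Nat := (PySem.List.index? alphabet c).getD 0
    (PySem.List.pyGet? alphabet (PySem.Int.mod ((idx : Int) + shift) n)).getD c

-- loop body of A: append the encrypted char and the meta code to the two accumulators
def pvLoopA (shift1 shift2 : Int) (acc : List Char × List Char) (c : Char) : List Char × List Char :=
  if PySem.Chars.islower c then
    if pvLowerFirst.contains c then
      (acc.1 ++ [pvShiftChar c (shift1 * shift2) pvAlphaLower], acc.2 ++ ['l'])
    else if pvLowerSecond.contains c then
      (acc.1 ++ [pvShiftChar c (-(shift1 + shift2)) pvAlphaLower], acc.2 ++ ['L'])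
    else (acc.1 ++ [c], acc.2 ++ ['0'])
  else if PySem.Chars.isupper c then
    if pvUpperFirst.contains c then
      (acc.1 ++ [pvShiftChar c (-shift1) pvAlphaUpper], acc.2 ++ ['u'])
    else if pvUpperSecond.contains c then
      (acc.1 ++ [pvShiftChar c (shift2 ^ 2) pvAlphaUpper], acc.2 ++ ['U'])
    else (acc.1 ++ [c], acc.2 ++ ['0'])
  else (acc.1 ++ [c], acc.2 ++ ['0'])

def encrypt_text_with_meta (text : String) (shift1 : Int) (shift2 : Int) : String × String :=
  let r := text.toList.foldl (pvLoopA shift1 shift2) ([], [])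
  (String.ofList r.1, String.ofList r.2)

-- ===== PORT B =====
-- _build_table: the 52-entry table, built once (lowercase loop, then uppercase loop)
def pvBuildTable (shift1 shift2 : Int) : PySem.Dict Char (Char × Char) :=
  (PySem.List.enumerate pvAlphaUpper 0).foldl
    (fun d ic =>
      if ic.1 < 13 then
        d.insert ic.2 ((PySem.List.pyGet? pvAlphaUpper (PySem.Int.mod (ic.1 - shift1) 26)).getD ic.2, 'u')
      else
        d.insert ic.2 ((PySem.List.pyGet? pvAlphaUpper (PySem.Int.mod (ic.1 + shift2 ^ 2) 26)).getD ic.2, 'U'))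
    ((PySem.List.enumerate pvAlphaLower 0).foldl
      (fun d ic =>
        if ic.1 < 13 then
          d.insert ic.2 ((PySem.List.pyGet? pvAlphaLower (PySem.Int.mod (ic.1 + shift1 * shift2) 26)).getD ic.2, 'l')
        else
          d.insert ic.2 ((PySem.List.pyGet? pvAlphaLower (PySem.Int.mod (ic.1 - (shift1 + shift2)) 26)).getD ic.2, 'L'))
      PySem.Dict.empty)

-- loop body of B: one table lookup, default (c, '0')
def pvLoopB (table : PySem.Dict Char (Char × Char)) (acc : List Char × List Char) (c : Char) : List Char × List Char :=
  let em := table.getD c (c, '0')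
  (acc.1 ++ [em.1], acc.2 ++ [em.2])

def encrypt_text_with_meta_alt (text : String) (shift1 : Int) (shift2 : Int) : String × String :=
  let table := pvBuildTable shift1 shift2
  let r := text.toList.foldl (pvLoopB table) ([], [])
  (String.ofList r.1, String.ofList r.2)

-- ===== PRECONDITION & SPEC =====
def Spec_encrypt_text_with_meta (text : String) (shift1 : Int) (shift2 : Int) (out : String × String) : Prop := out = encrypt_text_with_meta_alt text shift1 shift2
instance (text : String) (shift1 : Int) (shift2 : Int) (out : String × String) : Decidable (Spec_encrypt_text_with_meta text shift1 shift2 out) := by unfold Spec_encrypt_text_with_meta; infer_instance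

-- ===== CLAIM (what is proved, stated in full; the proofs are below) =====
def Claim_equal_encrypt_text_with_meta : Prop := ∀ (text : String) (shift1 : Int) (shift2 : Int), Dom_encrypt_text_with_meta text shift1 shift2 → Spec_encrypt_text_with_meta text shift1 shift2 (encrypt_text_with_meta text shift1 shift2)

-- ===== LEMMAS AND PROOFS =====

-- the entry the lowercase loop stores for the pair ic = (index, letter)
def pvF1 (s1 s2 : Int) (ic : Int × Char) : Char × (Char × Char) :=
  (ic.2, if ic.1 < 13 then
      ((PySem.List.pyGet? pvAlphaLower (PySem.Int.mod (ic.1 + s1 * s2) 26)).getD ic.2, 'l')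
    else
      ((PySem.List.pyGet? pvAlphaLower (PySem.Int.mod (ic.1 - (s1 + s2)) 26)).getD ic.2, 'L'))

-- the entry the uppercase loop stores
def pvF2 (s1 s2 : Int) (ic : Int × Char) : Char × (Char × Char) :=
  (ic.2, if ic.1 < 13 then
      ((PySem.List.pyGet? pvAlphaUpper (PySem.Int.mod (ic.1 - s1) 26)).getD ic.2, 'u')
    else
      ((PySem.List.pyGet? pvAlphaUpper (PySem.Int.mod (ic.1 + s2 ^ 2) 26)).getD ic.2, 'U'))

-- the table as a literal association list
def pvTable' (s1 s2 : Int) : PySem.Dict Char (Char × Char) :=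
  PySem.Dict.mk ((PySem.List.enumerate pvAlphaLower 0).map (pvF1 s1 s2) ++
                 (PySem.List.enumerate pvAlphaUpper 0).map (pvF2 s1 s2))

lemma pvBuild_eq (s1 s2 : Int) : pvBuildTable s1 s2 = pvTable' s1 s2 := by
  have hb1 : (fun (d : PySem.Dict Char (Char × Char)) (ic : Int × Char) =>
      if ic.1 < 13 then
        d.insert ic.2 ((PySem.List.pyGet? pvAlphaLower (PySem.Int.mod (ic.1 + s1 * s2) 26)).getD ic.2, 'l')
      else
        d.insert ic.2 ((PySem.List.pyGet? pvAlphaLower (PySem.Int.mod (ic.1 - (s1 + s2)) 26)).getD ic.2, 'L')) =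
      (fun d ic => d.insert ic.2 (pvF1 s1 s2 ic).2) := by
    funext d ic; simp only [pvF1]; split <;> rfl
  have hb2 : (fun (d : PySem.Dict Char (Char × Char)) (ic : Int × Char) =>
      if ic.1 < 13 then
        d.insert ic.2 ((PySem.List.pyGet? pvAlphaUpper (PySem.Int.mod (ic.1 - s1) 26)).getD ic.2, 'u')
      else
        d.insert ic.2 ((PySem.List.pyGet? pvAlphaUpper (PySem.Int.mod (ic.1 + s2 ^ 2) 26)).getD ic.2, 'U')) =
      (fun d ic => d.insert ic.2 (pvF2 s1 s2 ic).2) := by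
    funext d ic; simp only [pvF2]; split <;> rfl
  have hnodL : ((PySem.List.enumerate pvAlphaLower 0).map (·.2)).Nodup := by
    rw [PySem.List.map_snd_enumerate]; decide
  have hnodU : ((PySem.List.enumerate pvAlphaUpper 0).map (·.2)).Nodup := by
    rw [PySem.List.map_snd_enumerate]; decide
  have hinner : ((PySem.List.enumerate pvAlphaLower 0).foldl
      (fun d ic => d.insert ic.2 (pvF1 s1 s2 ic).2) PySem.Dict.empty).items =
      (PySem.List.enumerate pvAlphaLower 0).map (pvF1 s1 s2) := by
    rw [PySem.Dict.items_foldl_insert_fresh _ _ _ _ (fun a _ => by simp) hnodL]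
    rfl
  have hkeys : ((PySem.List.enumerate pvAlphaLower 0).foldl
      (fun d ic => d.insert ic.2 (pvF1 s1 s2 ic).2) PySem.Dict.empty).keys = pvAlphaLower := by
    simp only [PySem.Dict.keys, hinner, List.map_map]
    have h : ((fun (p : Char × (Char × Char)) => p.1) ∘ pvF1 s1 s2) = (fun (x : Int × Char) => x.2) := by
      funext a; rfl
    rw [h, PySem.List.map_snd_enumerate]
  have hup : ∀ c ∈ pvAlphaUpper, c.toNat ≤ 90 := by
    intro c hc
    fin_cases hc <;> decide
  have hlo : ∀ c ∈ pvAlphaLower, 97 ≤ c.toNat := by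
    intro c hc
    fin_cases hc <;> decide
  have hdisj : ∀ c ∈ pvAlphaUpper, c ∉ pvAlphaLower := by
    intro c hc hcl
    have h1 := hup c hc
    have h2 := hlo c hcl
    omega
  have hfreshU : ∀ a ∈ PySem.List.enumerate pvAlphaUpper 0,
      ((PySem.List.enumerate pvAlphaLower 0).foldl
        (fun d ic => d.insert ic.2 (pvF1 s1 s2 ic).2) PySem.Dict.empty).contains a.2 = false := by
    intro a ha
    have ha2 : a.2 ∈ pvAlphaUpper := by
      rw [← PySem.List.map_snd_enumerate pvAlphaUpper 0]
      exact List.mem_map_of_mem ha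
    rw [PySem.Dict.contains_eq_decide_mem_keys, hkeys]
    exact decide_eq_false (hdisj a.2 ha2)
  apply PySem.Dict.ext
  unfold pvBuildTable pvTable'
  rw [hb1, hb2]
  rw [PySem.Dict.items_foldl_insert_fresh _ _ _ _ hfreshU hnodU, hinner]
  rfl

-- per-character agreement, on characters given by their code point (≤ 126 covers the domain)
lemma pvLoop_eq_ofNat (s1 s2 : Int) (n : Nat) (hn : n ≤ 126) (acc : List Char × List Char) :
    pvLoopA s1 s2 acc (Char.ofNat n) = pvLoopB (pvTable' s1 s2) acc (Char.ofNat n) := by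
  interval_cases n <;> rfl

lemma pvLoop_eq (s1 s2 : Int) (c : Char) (hc : pvDomChar c = true) (acc : List Char × List Char) :
    pvLoopA s1 s2 acc c = pvLoopB (pvTable' s1 s2) acc c := by
  have hn : c.toNat ≤ 126 := by
    simp only [pvDomChar, Bool.or_eq_true, Bool.and_eq_true, decide_eq_true_eq, beq_iff_eq] at hc
    omega
  have h := pvLoop_eq_ofNat s1 s2 c.toNat hn acc
  rwa [Char.ofNat_toNat] at h

-- ===== VERDICT (by name: the statement is the Claim_ definition above) =====
theorem encrypt_text_with_meta_spec : Claim_equal_encrypt_text_with_meta := by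
  intro text shift1 shift2 hdom
  unfold Spec_encrypt_text_with_meta encrypt_text_with_meta encrypt_text_with_meta_alt
  have hall : ∀ c ∈ text.toList, pvDomChar c = true := by
    have hs : pvDomStr text = true := by
      unfold Dom_encrypt_text_with_meta at hdom
      simp only [Bool.and_eq_true] at hdom
      exact hdom.1.1
    simpa [pvDomStr, List.all_eq_true] using hs
  have hfold : text.toList.foldl (pvLoopA shift1 shift2) ([], []) =
      text.toList.foldl (pvLoopB (pvBuildTable shift1 shift2)) ([], []) := by
    rw [pvBuild_eq]
    apply PySem.List.foldl_congr_mem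
    intro acc c hc
    exact pvLoop_eq shift1 shift2 c (hall c hc) acc
  rw [hfold]
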